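-- pv_equiv track=rewrite | github.com/debashishroy00/helix | src/layers/shadow_dom_handler.py | _infer_element_type
-- ===== SOURCE A (Python) =====
-- def _infer_element_type(intent: str) -> str:
--     """Infer element type from intent."""
--
--     intent_lower = intent.lower()
--
--     if any(word in intent_lower for word in ["button", "submit", "click", "save", "cancel"]):
--         return "button"
--     elif any(word in intent_lower for word in ["input", "field", "text", "email", "password"]):
--         return "input"
--     elif any(word in intent_lower for word in ["link", "navigate", "href"]):
--         return "a"
--     elif any(word in intent_lower for word in ["dropdown", "select", "picker"]):
--         return "select"
--     elif any(word in intent_lower for word in ["checkbox", "check"]):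
--         return "input[type='checkbox']"
--     elif any(word in intent_lower for word in ["radio"]):
--         return "input[type='radio']"
--     else:
--         return "*"  # Any element
-- ===== SOURCE B (Python) =====
-- _TYPES = ["button", "input", "a", "select", "input[type='checkbox']", "input[type='radio']"]
--
-- _PRIORITY = {
--     "button": 0, "submit": 0, "click": 0, "save": 0, "cancel": 0,
--     "input": 1, "field": 1, "text": 1, "email": 1, "password": 1,
--     "link": 2, "navigate": 2, "href": 2,
--     "dropdown": 3, "select": 3, "picker": 3,
--     "checkbox": 4, "check": 4,
--     "radio": 5,
-- }
--
--
-- def _infer_element_type(intent: str) -> str: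
--     s = intent.lower()
--     matched = [p for w, p in _PRIORITY.items() if w in s]
--     return _TYPES[min(matched)] if matched else "*"
-- ===== Notes on version B (the rewrite author's own statement) =====
-- stated objective: alternative
-- what changed: Instead of an ordered early-exit scan of keyword groups, B collects the priorities of ALL matching keywords from a flat keyword->priority map and selects the minimum priority, indexing into a type table; A's branch order becomes the priority order.
import Mathlib
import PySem

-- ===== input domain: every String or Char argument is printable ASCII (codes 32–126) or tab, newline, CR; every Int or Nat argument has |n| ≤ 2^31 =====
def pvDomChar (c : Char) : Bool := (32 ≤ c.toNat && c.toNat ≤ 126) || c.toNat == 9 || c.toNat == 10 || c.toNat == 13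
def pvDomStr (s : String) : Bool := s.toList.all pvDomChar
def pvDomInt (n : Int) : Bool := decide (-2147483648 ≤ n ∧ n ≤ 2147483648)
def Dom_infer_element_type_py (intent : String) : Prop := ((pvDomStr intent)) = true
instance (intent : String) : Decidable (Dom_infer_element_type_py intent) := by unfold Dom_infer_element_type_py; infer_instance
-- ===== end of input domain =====

-- B drops the early-exit if/elif chain: it collects the priorities of ALL matching
-- keywords from a flat keyword→priority map and returns the type of the MINIMUM
-- priority (alternative decomposition, same behaviour).

-- ===== PORT A =====
def infer_element_type_py (intent : String) : String :=
  let intent_lower := PySem.Str.lower intent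
  if ["button", "submit", "click", "save", "cancel"].any (fun w => PySem.Str.isIn w intent_lower) then
    "button"
  else if ["input", "field", "text", "email", "password"].any (fun w => PySem.Str.isIn w intent_lower) then
    "input"
  else if ["link", "navigate", "href"].any (fun w => PySem.Str.isIn w intent_lower) then
    "a"
  else if ["dropdown", "select", "picker"].any (fun w => PySem.Str.isIn w intent_lower) then
    "select"
  else if ["checkbox", "check"].any (fun w => PySem.Str.isIn w intent_lower) then
    "input[type='checkbox']"
  else if ["radio"].any (fun w => PySem.Str.isIn w intent_lower) then
    "input[type='radio']"
  else
    "*"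

-- ===== PORT B =====
def pvTypes : List String :=
  ["button", "input", "a", "select", "input[type='checkbox']", "input[type='radio']"]

def pvPriority : List (String × Nat) :=
  [ ("button", 0), ("submit", 0), ("click", 0), ("save", 0), ("cancel", 0),
    ("input", 1), ("field", 1), ("text", 1), ("email", 1), ("password", 1),
    ("link", 2), ("navigate", 2), ("href", 2),
    ("dropdown", 3), ("select", 3), ("picker", 3),
    ("checkbox", 4), ("check", 4),
    ("radio", 5) ]

def infer_element_type_py_alt (intent : String) : String :=
  let s := PySem.Str.lower intent
  let matched := (pvPriority.filter (fun kp => PySem.Str.isIn kp.1 s)).map Prod.snd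
  match PySem.List.min? matched (fun p => p) with
  | some m => PySem.List.pyGetD pvTypes (m : Int) ""  -- _TYPES[min(matched)]; m ≤ 5 < len(pvTypes), so exact
  | none => "*"

-- ===== PRECONDITION & SPEC =====
def Spec_infer_element_type_py (intent : String) (out : String) : Prop := out = infer_element_type_py_alt intent
instance (intent : String) (out : String) : Decidable (Spec_infer_element_type_py intent out) := by unfold Spec_infer_element_type_py; infer_instance

-- ===== CLAIM (what is proved, stated in full; the proofs are below) =====
def Claim_equal_infer_element_type_py : Prop := ∀ (intent : String), Dom_infer_element_type_py intent → Spec_infer_element_type_py intent (infer_element_type_py intent)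

-- ===== LEMMAS AND PROOFS =====

theorem pv_foldl_min_const (i : Nat) (xs : List Nat) (h : ∀ x ∈ xs, i ≤ x) :
    xs.foldl min i = i := by
  induction xs with
  | nil => rfl
  | cons x t ih =>
    have hx : i ≤ x := h x (by simp)
    simp only [List.foldl_cons, min_eq_left hx]
    exact ih (fun y hy => h y (by simp [hy]))

-- min-priority over one keyword group (priority i) plus the remaining keywords (priorities ≥ i)
theorem pv_min_group (s : String) (i : Nat) (g : List String) (rest : List (String × Nat))
    (hrest : ∀ p ∈ rest, i ≤ p.2) :
    PySem.List.min?
        (((g.map (fun w => (w, i)) ++ rest).filter (fun kp => PySem.Str.isIn kp.1 s)).map Prod.snd)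
        (fun p => p)
      = if g.any (fun w => PySem.Str.isIn w s) then some i
        else PySem.List.min? ((rest.filter (fun kp => PySem.Str.isIn kp.1 s)).map Prod.snd) (fun p => p) := by
  induction g with
  | nil => rfl
  | cons w g' ih =>
    by_cases hw : PySem.Str.isIn w s = true
    · have htail : ∀ x ∈ (((g'.map (fun w => (w, i)) ++ rest).filter
          (fun kp => PySem.Str.isIn kp.1 s)).map Prod.snd), i ≤ x := by
        intro x hx
        obtain ⟨kp, hkp, rfl⟩ := List.mem_map.mp hx
        rcases List.mem_append.mp (List.mem_filter.mp hkp).1 with h | h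
        · obtain ⟨w', -, hw'⟩ := List.mem_map.mp h
          subst hw'; simp
        · exact hrest kp h
      simp only [List.map_cons, List.cons_append, List.filter_cons, List.any_cons, hw,
        Bool.true_or, if_true, PySem.List.min?_id_cons, pv_foldl_min_const i _ htail]
    · simp only [Bool.not_eq_true] at hw
      simp only [List.map_cons, List.cons_append, List.filter_cons, hw,
        List.any_cons, Bool.false_or]
      simpa using ih

theorem pv_keywords_split :
    pvPriority =
      (["button", "submit", "click", "save", "cancel"].map (fun w => (w, 0)) ++
      (["input", "field", "text", "email", "password"].map (fun w => (w, 1)) ++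
      (["link", "navigate", "href"].map (fun w => (w, 2)) ++
      (["dropdown", "select", "picker"].map (fun w => (w, 3)) ++
      (["checkbox", "check"].map (fun w => (w, 4)) ++
      (["radio"].map (fun w => (w, 5)) ++ ([] : List (String × Nat)))))))) := rfl

-- ===== VERDICT (by name: the statement is the Claim_ definition above) =====
theorem infer_element_type_py_spec : Claim_equal_infer_element_type_py := by
  intro intent _
  show infer_element_type_py intent = infer_element_type_py_alt intent
  simp only [infer_element_type_py, infer_element_type_py_alt, pv_keywords_split]
  rw [pv_min_group _ 0 _ _ (by decide),
      pv_min_group _ 1 _ _ (by decide),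
      pv_min_group _ 2 _ _ (by decide),
      pv_min_group _ 3 _ _ (by decide),
      pv_min_group _ 4 _ _ (by decide),
      pv_min_group _ 5 _ _ (by decide)]
  split_ifs <;> rfl
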